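-- pv_equiv track=rewrite | github.com/AustinTSchaffer/DailyProgrammer | LeetCode/3Sum/app.py | cleanup_nums
-- ===== SOURCE A (Python) =====
-- from typing import List, Set, Tuple, Iterable
-- from collections import defaultdict
--
-- def cleanup_nums(max_each_num: int, nums: List[int]) -> List[int]:
--     """
--     Sorts the input list of numbers making sure that each number only appears
--     at most `max_each_num` times in the output.
--     """
--
--     histogram = defaultdict(int)
--
--     for num in nums:
--         histogram[num] += 1
--
--     return [
--         number
--         for number in sorted(histogram.keys())
--         for _ in range(min(max_each_num, histogram[number]))
--     ]
-- ===== SOURCE B (Python) =====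
-- from typing import List
--
-- def cleanup_nums(max_each_num: int, nums: List[int]) -> List[int]:
--     # Filter first, sort after: keep each occurrence only while that value's
--     # running count is still below the cap, then sort the kept elements once.
--     seen = {}
--     kept = []
--     for num in nums:
--         c = seen.get(num, 0)
--         if c < max_each_num:
--             kept.append(num)
--             seen[num] = c + 1
--     return sorted(kept)
-- ===== Notes on version B (the rewrite author's own statement) =====
-- stated objective: faster
-- what changed: Instead of building a full histogram and then emitting min(cap,count) copies of each sorted key via a nested comprehension, B filters the raw input in one pass (keeping an occurrence only while its running count is below the cap) and sorts the kept elements once.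
import Mathlib
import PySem

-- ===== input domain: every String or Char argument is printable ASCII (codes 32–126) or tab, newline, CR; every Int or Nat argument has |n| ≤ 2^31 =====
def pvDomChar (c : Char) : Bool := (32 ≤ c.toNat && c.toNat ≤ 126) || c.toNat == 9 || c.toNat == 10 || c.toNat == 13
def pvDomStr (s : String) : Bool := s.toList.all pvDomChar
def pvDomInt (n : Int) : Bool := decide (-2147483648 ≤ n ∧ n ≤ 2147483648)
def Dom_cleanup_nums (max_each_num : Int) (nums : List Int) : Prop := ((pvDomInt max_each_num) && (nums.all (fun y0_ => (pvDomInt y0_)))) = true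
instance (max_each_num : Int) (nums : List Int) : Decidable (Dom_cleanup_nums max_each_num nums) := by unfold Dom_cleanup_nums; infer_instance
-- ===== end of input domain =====

-- B filters the raw input in one pass (keeping an occurrence only while its running
-- count is below the cap) and sorts the kept elements once, instead of A's
-- histogram-then-emit-per-sorted-key (objective: faster by a constant factor, measured).

-- ===== PORT A =====
def cleanup_nums (max_each_num : Int) (nums : List Int) : List Int :=
  let histogram := nums.foldl (fun d num => d.modify num 0 (· + 1)) PySem.Dict.empty
  (PySem.List.sorted histogram.keys (fun x => x) false).flatMap
    (fun number =>
      (PySem.List.pyRange 0 (min max_each_num (histogram.getD number 0)) 1).map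
        (fun _ => number))

-- ===== PORT B =====
def cleanup_nums_alt (max_each_num : Int) (nums : List Int) : List Int :=
  let st := nums.foldl
    (fun (st : PySem.Dict Int Int × List Int) num =>
      let c := st.1.getD num 0
      if c < max_each_num then (st.1.insert num (c + 1), st.2 ++ [num]) else st)
    (PySem.Dict.empty, [])
  PySem.List.sorted st.2 (fun x => x) false

-- ===== PRECONDITION & SPEC =====
def Spec_cleanup_nums (max_each_num : Int) (nums : List Int) (out : List Int) : Prop := out = cleanup_nums_alt max_each_num nums
instance (max_each_num : Int) (nums : List Int) (out : List Int) : Decidable (Spec_cleanup_nums max_each_num nums out) := by unfold Spec_cleanup_nums; infer_instance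

-- ===== CLAIM (what is proved, stated in full; the proofs are below) =====
def Claim_equal_cleanup_nums : Prop := ∀ (max_each_num : Int) (nums : List Int), Dom_cleanup_nums max_each_num nums → Spec_cleanup_nums max_each_num nums (cleanup_nums max_each_num nums)

-- ===== LEMMAS AND PROOFS =====

-- the capped count: how many copies of a value both programs keep
def pvCap (m c : Int) : Nat := (min m c).toNat

-- B's loop invariant: the dict stores each value's kept-count, and the kept list
-- holds each value pvCap m (count so far) times
theorem pv_b_inv (m : Int) : ∀ (nums : List Int) (d : PySem.Dict Int Int) (kept p : List Int),
    (∀ k, d.getD k 0 = (kept.count k : Int)) →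
    (∀ k, kept.count k = pvCap m (p.count k)) →
    ∀ k, ((nums.foldl
      (fun (st : PySem.Dict Int Int × List Int) num =>
        let c := st.1.getD num 0
        if c < m then (st.1.insert num (c + 1), st.2 ++ [num]) else st)
      (d, kept)).2).count k = pvCap m ((p ++ nums).count k) := by
  intro nums
  induction nums with
  | nil => intro d kept p _ h2 k; simpa using h2 k
  | cons x xs ih =>
    intro d kept p h1 h2 k
    simp only [List.foldl_cons]
    have hcx : d.getD x 0 = (kept.count x : Int) := h1 x
    by_cases hc : d.getD x 0 < m
    · simp only [hc, if_true]
      have hd' : ∀ j, ((d.insert x (d.getD x 0 + 1)).getD j 0) = (((kept ++ [x]).count j : Nat) : Int) := by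
        intro j
        rw [PySem.Dict.getD_insert, List.count_append]
        by_cases hj : j = x
        · subst hj; simp [hcx]
        · have : List.count j [x] = 0 := List.count_eq_zero.mpr (by simp [hj])
          simp [hj, h1 j, this]
      have hk' : ∀ j, (kept ++ [x]).count j = pvCap m ((p ++ [x]).count j) := by
        intro j
        rw [List.count_append, List.count_append, h2 j]
        by_cases hj : j = x
        · subst hj
          have hlt : (kept.count j : Int) < m := by rw [← h1 j]; exact hc
          rw [h2 j] at hlt
          have h1c : List.count j [j] = 1 := by simp
          rw [h1c]
          unfold pvCap at *; omega
        · have h0 : List.count j [x] = 0 := List.count_eq_zero.mpr (by simp [hj])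
          simp [h0]
      have := ih (d.insert x (d.getD x 0 + 1)) (kept ++ [x]) (p ++ [x]) hd' hk' k
      rw [this]
      congr 1
      simp [List.count_append]
    · simp only [hc, if_false]
      have hk' : ∀ j, kept.count j = pvCap m ((p ++ [x]).count j) := by
        intro j
        rw [List.count_append, h2 j]
        by_cases hj : j = x
        · subst hj
          have hge : ¬ (kept.count j : Int) < m := by rw [← h1 j]; exact hc
          rw [h2 j] at hge
          have h1c : List.count j [j] = 1 := by simp
          rw [h1c]
          unfold pvCap at *; omega
        · have h0 : List.count j [x] = 0 := List.count_eq_zero.mpr (by simp [hj])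
          simp [h0]
      have := ih d kept (p ++ [x]) h1 hk' k
      rw [this]
      congr 1
      simp [List.count_append]

-- count of A's flatMap of replicates over a nodup key list
theorem pv_a_count (m : Int) (nums : List Int) :
    ∀ (L : List Int), L.Nodup → (∀ j ∈ L, j ∈ nums) →
    ∀ k, (L.flatMap (fun j => List.replicate (pvCap m (nums.count j)) j)).count k
      = if k ∈ L then pvCap m (nums.count k) else 0 := by
  intro L
  induction L with
  | nil => simp
  | cons a L ih =>
    intro hnd hmem k
    rw [List.flatMap_cons, List.count_append,
      ih (List.nodup_cons.mp hnd).2 (fun j hj => hmem j (List.mem_cons_of_mem _ hj)) k]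
    by_cases hk : k = a
    · subst hk
      simp [if_neg (fun h => (List.nodup_cons.mp hnd).1 h)]
    · simp [List.count_replicate, hk, Ne.symm hk]

-- flatMap of replicates over a strictly increasing key list is ≤-sorted
theorem pv_a_sorted (n : Int → Nat) :
    ∀ (L : List Int), L.Pairwise (· < ·) →
    (L.flatMap (fun j => List.replicate (n j) j)).Pairwise (· ≤ ·) := by
  intro L
  induction L with
  | nil => simp
  | cons a L ih =>
    intro h
    have hpc := List.pairwise_cons.mp h
    rw [List.flatMap_cons]
    apply List.pairwise_append.mpr
    refine ⟨List.pairwise_replicate.mpr (by simp), ih hpc.2, ?_⟩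
    intro x hx y hy
    have hxa : x = a := List.eq_of_mem_replicate hx
    obtain ⟨j, hj, hyj⟩ := List.mem_flatMap.mp hy
    have hya : y = j := List.eq_of_mem_replicate hyj
    rw [hxa, hya]
    exact le_of_lt (hpc.1 j hj)

-- k ∉ nums gives cap 0
theorem pv_cap_zero (m : Int) (nums : List Int) (k : Int) (h : k ∉ nums) :
    pvCap m (nums.count k) = 0 := by
  rw [List.count_eq_zero_of_not_mem h]; unfold pvCap; omega

-- ===== VERDICT (by name: the statement is the Claim_ definition above) =====
theorem cleanup_nums_spec : Claim_equal_cleanup_nums := by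
  intro m nums _
  unfold Spec_cleanup_nums cleanup_nums cleanup_nums_alt
  rw [← PySem.Dict.counter_eq_foldl]
  simp only [PySem.Dict.keys_counter]
  -- rewrite A's per-key range comprehensions as replicates of the capped count
  have hrep : ∀ k : Int, (PySem.List.pyRange 0 (min m ((PySem.Dict.counter nums).getD k 0)) 1).map
      (fun _ => k) = List.replicate (pvCap m (nums.count k)) k := by
    intro k
    rw [PySem.Dict.getD_counter, List.map_const']
    simp [PySem.List.length_pyRange_one, pvCap]
  rw [List.flatMap_congr (g := fun k => List.replicate (pvCap m (nums.count k)) k)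
      (fun k _ => hrep k)]
  set L := PySem.List.sorted (PySem.Set.ofList nums) (fun x => x) false with hL
  have hLnd : L.Nodup := ((PySem.List.sorted_perm _ _ _).nodup_iff).mpr (PySem.Set.nodup_ofList _)
  have hLmem : ∀ j, j ∈ L ↔ j ∈ nums := by
    intro j; simp [hL, PySem.List.mem_sorted, PySem.Set.mem_ofList]
  -- both sides are ≤-sorted with the same element counts, hence equal
  have hB := pv_b_inv m nums PySem.Dict.empty [] []
    (by intro k; simp [PySem.Dict.getD, PySem.Dict.get?, PySem.Dict.empty])
    (by intro k; unfold pvCap; simp; omega)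
  have hperm : (L.flatMap (fun k => List.replicate (pvCap m (nums.count k)) k)).Perm
      ((nums.foldl
        (fun (st : PySem.Dict Int Int × List Int) num =>
          let c := st.1.getD num 0
          if c < m then (st.1.insert num (c + 1), st.2 ++ [num]) else st)
        (PySem.Dict.empty, [])).2) := by
    apply List.perm_iff_count.mpr
    intro k
    rw [pv_a_count m nums L hLnd (fun j hj => (hLmem j).mp hj) k]
    have hBk := hB k
    simp only [List.nil_append] at hBk
    rw [hBk]
    by_cases hk : k ∈ L
    · simp [hk]
    · rw [if_neg hk, pv_cap_zero m nums k (fun h => hk ((hLmem k).mpr h))]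
  have hsortA : (L.flatMap (fun k => List.replicate (pvCap m (nums.count k)) k)).Pairwise (· ≤ ·) :=
    pv_a_sorted _ L (by rw [hL]; exact PySem.List.sorted_ofList_pairwise_lt _)
  exact (PySem.List.sorted_id_eq_of_perm_of_pairwise _ _ hperm hsortA).symm
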